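-- pv_equiv track=rewrite | github.com/yoavklausner/PreCourseHomeEx | secondPart/quest3.py | is_sorted_polyndrom
-- ===== SOURCE A (Python) =====
-- def is_sorted_polyndrom(sequence: str)->bool:
--     prevchar: chr = ' '   # white space preior to numbers and letters in ascii
--     length: int = len(sequence)
--     for i, char in enumerate(sequence[:int(length/2)+1]):
--         if char != sequence[length-1 - i] or char < prevchar:
--             return False
--         prevchar = char
--     return True
-- ===== SOURCE B (Python) =====
-- def is_sorted_polyndrom(sequence: str) -> bool:
--     half = len(sequence) // 2 + 1
--     prefix = sequence[:half]
--     is_pal = sequence == sequence[::-1]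
--     is_sorted = all(a <= b for a, b in zip(prefix, prefix[1:]))
--     return is_pal and is_sorted
-- ===== Notes on version B (the rewrite author's own statement) =====
-- stated objective: simpler
-- what changed: Replaces A's single interleaved half-scan (mirror equality and sortedness checked together with a threaded prevchar and early return) by two separate whole-value checks: a reverse-equality palindrome test plus an adjacent-pairs sortedness scan of the half-prefix.
-- intended difference: On nonempty sorted palindromes whose first character is below space (tab/newline/CR), A returns False only because its prevchar sentinel starts at the space character, while B returns True; B's value is intended since such a string is a sorted palindrome and the space floor is an accident of A's initialization. — e.g. on is_sorted_polyndrom("\t"): A returns false, B returns true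
import Mathlib
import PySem

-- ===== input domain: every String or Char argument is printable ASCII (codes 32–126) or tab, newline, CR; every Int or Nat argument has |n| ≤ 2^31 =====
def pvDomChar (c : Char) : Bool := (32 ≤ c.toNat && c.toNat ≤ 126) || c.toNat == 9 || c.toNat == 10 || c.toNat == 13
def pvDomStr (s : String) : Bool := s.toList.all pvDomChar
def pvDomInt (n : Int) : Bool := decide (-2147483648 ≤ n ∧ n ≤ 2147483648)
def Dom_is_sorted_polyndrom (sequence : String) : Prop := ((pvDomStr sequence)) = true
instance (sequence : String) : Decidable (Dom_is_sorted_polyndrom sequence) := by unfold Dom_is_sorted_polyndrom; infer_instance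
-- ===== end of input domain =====

-- B replaces A's interleaved half-scan by a reverse-equality palindrome test plus a
-- separate adjacent-pairs sortedness scan of the half-prefix (objective: simpler);
-- on D_ below (sorted palindromes starting below the space character) B intentionally differs from A.

-- ===== PORT A =====
-- the for-loop of A: state = prevchar, early 'return False' = result false
def pvLoopA (seq : List Char) (length : Nat) : List (Int × Char) → Char → Bool
  | [], _ => true
  | (i, c) :: rest, prevchar =>
      if c ≠ PySem.List.pyGetD seq ((length : Int) - 1 - i) ' ' || c < prevchar then false
      else pvLoopA seq length rest c

def is_sorted_polyndrom (sequence : String) : Bool :=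
  let seq := sequence.toList
  let length := seq.length
  pvLoopA seq length
    (PySem.List.enumerate (PySem.List.slice seq none (some ((length / 2 + 1 : Nat) : Int))) 0) ' '

-- ===== PORT B =====
def is_sorted_polyndrom_alt (sequence : String) : Bool :=
  let seq := sequence.toList
  let pre := PySem.List.slice seq none (some ((seq.length / 2 + 1 : Nat) : Int))
  let is_pal := seq == seq.reverse
  let is_sorted := (pre.zip pre.tail).all (fun p => decide (p.1 ≤ p.2))
  is_pal && is_sorted

-- ===== PRECONDITION & SPEC =====
-- On nonempty sorted palindromes whose first character is below space (tab/newline/CR),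
-- A returns False only because its prevchar sentinel starts at the space character, while B returns True;
-- B's value is intended since such a string is a sorted palindrome.
def D_is_sorted_polyndrom (sequence : String) : Prop :=
  sequence.toList ≠ [] ∧ sequence.toList.headD ' ' < ' ' ∧
  sequence.toList = sequence.toList.reverse ∧
  List.IsChain (· ≤ ·) (sequence.toList.take (sequence.toList.length / 2 + 1))
instance (sequence : String) : Decidable (D_is_sorted_polyndrom sequence) := by
  unfold D_is_sorted_polyndrom; infer_instance

def Spec_is_sorted_polyndrom (sequence : String) (out : Bool) : Prop :=
  ¬ D_is_sorted_polyndrom sequence → out = is_sorted_polyndrom_alt sequence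
instance (sequence : String) (out : Bool) : Decidable (Spec_is_sorted_polyndrom sequence out) := by
  unfold Spec_is_sorted_polyndrom; infer_instance

def pvDiffWitness_is_sorted_polyndrom : String := "\t"
def pvDiffWitnessOut_is_sorted_polyndrom : Bool × Bool := (false, true)

-- ===== CLAIM (what is proved, stated in full; the proofs are below) =====
def Claim_unchanged_is_sorted_polyndrom : Prop := ∀ (sequence : String), Dom_is_sorted_polyndrom sequence → Spec_is_sorted_polyndrom sequence (is_sorted_polyndrom sequence)
def Claim_changed_is_sorted_polyndrom : Prop := Dom_is_sorted_polyndrom (pvDiffWitness_is_sorted_polyndrom) ∧ D_is_sorted_polyndrom (pvDiffWitness_is_sorted_polyndrom) ∧ is_sorted_polyndrom (pvDiffWitness_is_sorted_polyndrom) = pvDiffWitnessOut_is_sorted_polyndrom.1 ∧ is_sorted_polyndrom_alt (pvDiffWitness_is_sorted_polyndrom) = pvDiffWitnessOut_is_sorted_polyndrom.2 ∧ pvDiffWitnessOut_is_sorted_polyndrom.1 ≠ pvDiffWitnessOut_is_sorted_polyndrom.2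
def Claim_exact_is_sorted_polyndrom : Prop := ∀ (sequence : String), Dom_is_sorted_polyndrom sequence → D_is_sorted_polyndrom sequence → is_sorted_polyndrom sequence ≠ is_sorted_polyndrom_alt sequence

-- ===== LEMMAS AND PROOFS =====

-- A's loop condition unfolded: a cons step succeeds iff the mirror char matches and prev ≤ c
lemma pvLoopA_cons (seq : List Char) (n : Nat) (i : Int) (c : Char)
    (rest : List (Int × Char)) (prev : Char) :
    pvLoopA seq n ((i, c) :: rest) prev =
      if c = PySem.List.pyGetD seq ((n : Int) - 1 - i) ' ' ∧ prev ≤ c then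
        pvLoopA seq n rest c else false := by
  by_cases h2 : prev ≤ c
  · by_cases h1 : c = PySem.List.pyGetD seq ((n : Int) - 1 - i) ' '
    · subst h1; simp [pvLoopA, h2, not_lt_of_ge h2]
    · simp [pvLoopA, h1, h2]
  · have hlt : c < prev := lt_of_not_ge h2
    simp [pvLoopA, hlt, h2]

-- characterisation of A's loop over an enumerated list
lemma pvLoopA_enum (seq : List Char) (n : Nat) (p : List Char) (s : Int) (prev : Char) :
    pvLoopA seq n (PySem.List.enumerate p s) prev = true ↔
      (∀ k (hk : k < p.length), p[k] = PySem.List.pyGetD seq ((n : Int) - 1 - (s + k)) ' ')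
        ∧ List.IsChain (· ≤ ·) (prev :: p) := by
  induction p generalizing s prev with
  | nil => simp [PySem.List.enumerate_nil, pvLoopA]
  | cons c rest ih =>
    rw [PySem.List.enumerate_cons, pvLoopA_cons]
    by_cases h : c = PySem.List.pyGetD seq ((n : Int) - 1 - s) ' ' ∧ prev ≤ c
    · rw [if_pos h, ih]
      constructor
      · rintro ⟨hmir, hch⟩
        refine ⟨?_, List.IsChain.cons_cons h.2 hch⟩
        intro k hk
        cases k with
        | zero => simpa using h.1
        | succ k =>
          have h3 : (n : Int) - 1 - (s + ((k + 1 : Nat) : Int))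
              = (n : Int) - 1 - ((s + 1) + (k : Int)) := by push_cast; ring
          rw [List.getElem_cons_succ, h3]
          exact hmir k (by simpa using hk)
      · rintro ⟨hmir, hch⟩
        rcases List.isChain_cons_cons.mp hch with ⟨-, hch'⟩
        refine ⟨?_, hch'⟩
        intro k hk
        have h3 : (n : Int) - 1 - ((s + 1) + (k : Int))
            = (n : Int) - 1 - (s + ((k + 1 : Nat) : Int)) := by push_cast; ring
        rw [h3]
        have := hmir (k + 1) (by simpa using hk)
        rwa [List.getElem_cons_succ] at this
    · rw [if_neg h]
      simp only [Bool.false_eq_true, false_iff]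
      rintro ⟨hmir, hch⟩
      rcases List.isChain_cons_cons.mp hch with ⟨hle, -⟩
      exact h ⟨by simpa using hmir 0 (by simp), hle⟩

-- B's sortedness scan equals the IsChain predicate
lemma zip_all_chain (p : List Char) :
    (p.zip p.tail).all (fun q => decide (q.1 ≤ q.2)) = true ↔
      List.IsChain (· ≤ ·) p := by
  induction p with
  | nil => simp
  | cons a rest ih =>
    cases rest with
    | nil => simp
    | cons b t => simp [List.isChain_cons_cons, ← ih]

-- the mirror condition on the half-prefix is exactly the palindrome condition
lemma mirror_iff_palindrome (l : List Char) :
    (∀ k (hk : k < (l.take (l.length / 2 + 1)).length),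
        (l.take (l.length / 2 + 1))[k] =
          PySem.List.pyGetD l ((l.length : Int) - 1 - ((0 : Int) + k)) ' ') ↔
      l = l.reverse := by
  have hcast : ∀ k : Nat, k < l.length →
      PySem.List.pyGetD l ((l.length : Int) - 1 - ((0 : Int) + k)) ' '
        = l.getD (l.length - 1 - k) ' ' := by
    intro k hk
    have h0 : ((l.length : Int) - 1 - ((0 : Int) + k)) = ((l.length - 1 - k : Nat) : Int) := by
      omega
    rw [h0, PySem.List.pyGetD_natCast]
  constructor
  · intro h
    apply List.ext_getElem (by simp)
    intro i hi hi'
    have key : ∀ j, j < l.length / 2 + 1 → (hj : j < l.length) →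
        l[j]'hj = l.getD (l.length - 1 - j) ' ' := by
      intro j hj1 hj2
      have hk : j < (l.take (l.length / 2 + 1)).length := by
        simp [List.length_take]; omega
      have := h j hk
      rwa [hcast j hj2, List.getElem_take] at this
    rw [List.getElem_reverse]
    by_cases hcase : i < l.length / 2 + 1
    · have := key i hcase hi
      rwa [List.getD_eq_getElem _ _ (by omega)] at this
    · have hj2 : l.length - 1 - i < l.length := by omega
      have := key (l.length - 1 - i) (by omega) hj2
      have hii : l.length - 1 - (l.length - 1 - i) = i := by omega
      rw [hii, List.getD_eq_getElem _ _ hi] at this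
      exact this.symm
  · intro hpal k hk
    have hkn : k < l.length := by
      simp [List.length_take] at hk; omega
    rw [List.getElem_take, hcast k hkn, List.getD_eq_getElem _ _ (by omega)]
    have h1 : l[k]'hkn = l.reverse[k]'(by simpa using hkn) := List.getElem_of_eq hpal hkn
    rwa [List.getElem_reverse] at h1

-- A as a proposition: palindrome ∧ the half-prefix chain including the ' ' sentinel
lemma portA_char (s : String) :
    is_sorted_polyndrom s = true ↔
      (s.toList = s.toList.reverse ∧
       List.IsChain (· ≤ ·)
         (' ' :: s.toList.take (s.toList.length / 2 + 1))) := by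
  simp only [is_sorted_polyndrom, PySem.List.slice_to_natCast]
  rw [pvLoopA_enum, mirror_iff_palindrome]

-- B as a proposition: palindrome ∧ the half-prefix chain
lemma portB_char (s : String) :
    is_sorted_polyndrom_alt s = true ↔
      (s.toList = s.toList.reverse ∧
       List.IsChain (· ≤ ·) (s.toList.take (s.toList.length / 2 + 1))) := by
  simp only [is_sorted_polyndrom_alt, PySem.List.slice_to_natCast, Bool.and_eq_true,
    beq_iff_eq]
  rw [zip_all_chain]

-- the head of the half-prefix is the head of the list (the prefix length is positive)
lemma take_head (l : List Char) (h : l ≠ []) :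
    l.take (l.length / 2 + 1) = l.headD ' ' :: (l.take (l.length / 2 + 1)).tail := by
  cases l with
  | nil => exact absurd rfl h
  | cons a t => simp [List.take_succ_cons]

-- ===== VERDICT (by name: the statement is the Claim_ definition above) =====
theorem is_sorted_polyndrom_spec : Claim_unchanged_is_sorted_polyndrom := by
  intro s _ hnD
  rw [Bool.eq_iff_iff, portA_char, portB_char]
  constructor
  · rintro ⟨hpal, hch⟩
    exact ⟨hpal, hch.tail⟩
  · rintro ⟨hpal, hch⟩
    refine ⟨hpal, ?_⟩
    by_cases hnil : s.toList = []
    · simp [hnil]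
    · have hle : ¬ s.toList.headD ' ' < ' ' := fun hlt =>
        hnD ⟨hnil, hlt, hpal, hch⟩
      rw [take_head s.toList hnil]
      rw [take_head s.toList hnil] at hch
      exact List.isChain_cons_cons.mpr ⟨le_of_not_gt hle, hch⟩

theorem is_sorted_polyndrom_changed : Claim_changed_is_sorted_polyndrom := by
  unfold Claim_changed_is_sorted_polyndrom; decide

theorem is_sorted_polyndrom_tight : Claim_exact_is_sorted_polyndrom := by
  intro s _ hD hEq
  rcases hD with ⟨hnil, hlt, hpal, hch⟩
  have hB : is_sorted_polyndrom_alt s = true := (portB_char s).mpr ⟨hpal, hch⟩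
  have hA : is_sorted_polyndrom s = true := by rw [hEq]; exact hB
  have := ((portA_char s).mp hA).2
  rw [take_head s.toList hnil] at this
  exact absurd (List.isChain_cons_cons.mp this).1 (not_le_of_gt hlt)
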